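-- pv_equiv track=rewrite | github.com/burgerphilic18/aoc-25 | day-2/sol2.py | check
-- ===== SOURCE A (Python) =====
-- def check(n):
--     num = str(n)
--     l = len(num)
--     for parts in range(2, l + 1):
--         if l % parts == 0:
--             size = l // parts
--             if num[:size] * parts == num:
--                 return True
--     return False
-- ===== SOURCE B (Python) =====
-- def check(n):
--     s = str(n)
--     return s in (s + s)[1:-1]
-- ===== Notes on version B (the rewrite author's own statement) =====
-- stated objective: idiomatic
-- what changed: Replaced the divisor-enumeration loop that rebuilds and compares a candidate block for every divisor count with the classic primitivity test: s is a repetition of a smaller block iff s occurs in (s+s)[1:-1], one doubled string and a single substring search.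
import Mathlib
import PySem

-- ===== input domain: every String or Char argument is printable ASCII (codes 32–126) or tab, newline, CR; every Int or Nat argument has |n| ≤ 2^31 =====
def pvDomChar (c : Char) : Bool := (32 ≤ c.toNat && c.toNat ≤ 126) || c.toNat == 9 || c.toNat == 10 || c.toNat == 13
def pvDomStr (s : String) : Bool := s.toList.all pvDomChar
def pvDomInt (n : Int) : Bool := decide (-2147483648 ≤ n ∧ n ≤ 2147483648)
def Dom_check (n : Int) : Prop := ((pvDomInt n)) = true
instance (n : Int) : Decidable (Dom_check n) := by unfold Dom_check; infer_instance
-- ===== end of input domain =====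

-- B replaces A's divisor-enumeration loop (rebuild and compare a candidate block for each
-- divisor count) by the classic primitivity test `s in (s+s)[1:-1]` (idiomatic; not claimed faster).


-- ===== PORT A =====
-- num = str(n); for parts in range(2, l+1): if l % parts == 0 and num[:size]*parts == num:
-- return True; return False   (early-return for-loop = List.any)
def check (n : Int) : Bool :=
  let num := PySem.Int.toChars n
  let l : Int := (num.length : Int)
  (PySem.List.pyRange 2 (l + 1) 1).any (fun parts =>
    if PySem.Int.mod l parts == 0 then
      let size := PySem.Int.floordiv l parts
      PySem.List.pyRepeat (PySem.List.slice num none (some size)) parts == num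
    else
      false)

-- ===== PORT B =====
-- s = str(n); return s in (s + s)[1:-1]
def check_alt (n : Int) : Bool :=
  let s := PySem.Int.toChars n
  PySem.Chars.isIn s (PySem.List.slice (s ++ s) (some 1) (some (-1)))

-- ===== PRECONDITION & SPEC =====
def Spec_check (n : Int) (out : Bool) : Prop := out = check_alt n
instance (n : Int) (out : Bool) : Decidable (Spec_check n out) := by unfold Spec_check; infer_instance

-- ===== CLAIM (what is proved, stated in full; the proofs are below) =====
def Claim_equal_check : Prop := ∀ (n : Int), Dom_check n → Spec_check n (check n)

-- ===== LEMMAS AND PROOFS =====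

-- str(n) is never the empty string
theorem pv_toChars_ne_nil (n : Int) : PySem.Int.toChars n ≠ [] := by
  unfold PySem.Int.toChars
  split
  · simp
  · have : 0 < (Nat.toDigits 10 n.toNat).length := Nat.length_toDigits_pos
    intro h
    simp [h] at this

-- the length-|s| window of s++s at offset k ≤ |s| is the k-rotation of s
theorem pv_window (s : List Char) (k : ℕ) (hk : k ≤ s.length) :
    ((s ++ s).drop k).take s.length = s.rotate k := by
  rw [List.rotate_eq_drop_append_take hk, List.drop_append, List.take_append]
  have h1 : k - s.length = 0 := by omega
  have h2 : (s.drop k).length = s.length - k := by simp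
  rw [h1]
  simp only [List.drop_zero]
  rw [List.take_of_length_le (le_of_eq h2 |>.trans (by omega)), h2]
  have h3 : s.length - (s.length - k) = k := by omega
  rw [h3]

-- (s+s)[1:-1] as drop/take
theorem pv_slice11 (s : List Char) (hs : s ≠ []) :
    PySem.List.slice (s ++ s) (some 1) (some (-1))
      = ((s ++ s).drop 1).take (2 * s.length - 2) := by
  have hl : 1 ≤ s.length := List.length_pos_iff.mpr hs
  unfold PySem.List.slice
  have ha : PySem.List.clampIdx (s ++ s).length 1 = 1 := by
    have := PySem.List.clampIdx_natCast (s ++ s).length 1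
    simp only [Nat.cast_one] at this
    rw [this]; simp; omega
  have hb : PySem.List.clampIdx (s ++ s).length (-1) = (s ++ s).length - 1 :=
    PySem.List.clampIdx_neg_one _
  simp only [ha, hb]
  congr 1
  simp; omega

-- B's substring test finds exactly the nontrivial rotations fixing s
theorem pv_B_iff (s : List Char) (hs : s ≠ []) :
    (PySem.Chars.isIn s (PySem.List.slice (s ++ s) (some 1) (some (-1))) = true)
      ↔ ∃ k, 1 ≤ k ∧ k < s.length ∧ s.rotate k = s := by
  have hl : 1 ≤ s.length := List.length_pos_iff.mpr hs
  rw [pv_slice11 s hs, ← PySem.Chars.exists_prefix_drop_iff_isIn]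
  constructor
  · rintro ⟨j, hj⟩
    rw [List.drop_take, List.prefix_take_iff] at hj
    obtain ⟨hpre, hlen⟩ := hj
    refine ⟨j + 1, by omega, by omega, ?_⟩
    rw [List.prefix_iff_eq_take, List.drop_drop] at hpre
    rw [show 1 + j = j + 1 by omega, pv_window s (j + 1) (by omega)] at hpre
    exact hpre.symm
  · rintro ⟨k, hk1, hk2, hrot⟩
    refine ⟨k - 1, ?_⟩
    rw [List.drop_take, List.prefix_take_iff]
    constructor
    · rw [List.prefix_iff_eq_take, List.drop_drop]
      rw [show 1 + (k - 1) = k by omega]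
      rw [pv_window s k (by omega), hrot]
    · omega

-- a flattened replicate is fixed by rotating one block length
theorem pv_rot_of_rep (m : ℕ) (t : List Char) (hm : 1 ≤ m) :
    ((List.replicate m t).flatten).rotate t.length = (List.replicate m t).flatten := by
  obtain ⟨m', rfl⟩ : ∃ m', m = m' + 1 := ⟨m - 1, by omega⟩
  have hlen : t.length ≤ ((List.replicate (m' + 1) t).flatten).length := by
    simp [List.length_flatten]; nlinarith
  rw [List.rotate_eq_drop_append_take hlen]
  rw [List.replicate_succ, List.flatten_cons]
  rw [List.drop_append_of_le_length (le_refl _), List.take_append_of_le_length (le_refl _)]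
  simp only [List.drop_length, List.nil_append, List.take_length]
  calc (List.replicate m' t).flatten ++ t = (List.replicate (m' + 1) t).flatten := by
        rw [List.replicate_succ']; simp
    _ = t ++ (List.replicate m' t).flatten := by rw [List.replicate_succ]; simp

-- a list fixed by rotation through a block that divides its length is that block repeated
theorem pv_rep_of_rot (d : ℕ) : ∀ (m : ℕ) (s : List Char), s.length = d * m →
    s.rotate d = s → s = (List.replicate m (s.take d)).flatten := by
  intro m
  induction m with
  | zero => intro s hl _; simp at hl; simp [hl]
  | succ m ih =>
    intro s hl hrot
    rw [Nat.mul_succ] at hl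
    have hdl : d ≤ s.length := by omega
    rcases Nat.eq_zero_or_pos m with hm | hm
    · subst hm
      have h1 : s.take d = s := List.take_of_length_le (by omega)
      simp [h1]
    · have hdu : d ≤ (s.drop d).length := by
        rw [List.length_drop]
        have : d ≤ d * m := Nat.le_mul_of_pos_right d hm
        omega
      have hut : s.drop d ++ s.take d = s := by
        rw [← List.rotate_eq_drop_append_take hdl]; exact hrot
      have htu : (s.drop d).take d = s.take d := by
        have h1 : ((s.drop d) ++ (s.take d)).take d = s.take d := by rw [hut]
        rw [List.take_append_of_le_length hdu] at h1
        exact h1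
      have h2 : (s.drop d).drop d ++ s.take d = s.drop d := by
        have h1 : ((s.drop d) ++ (s.take d)).drop d = s.drop d := by rw [hut]
        rw [List.drop_append_of_le_length hdu] at h1
        exact h1
      have hru : (s.drop d).rotate d = s.drop d := by
        rw [List.rotate_eq_drop_append_take hdu, htu, h2]
      have hulen : (s.drop d).length = d * m := by rw [List.length_drop]; omega
      have hrec := ih (s.drop d) hulen hru
      rw [htu] at hrec
      rw [List.replicate_succ, List.flatten_cons, ← hrec]
      exact (List.take_append_drop d s).symm

theorem pv_rot_mul (s : List Char) (k : ℕ) (hrot : s.rotate k = s) :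
    ∀ q, s.rotate (k * q) = s := by
  intro q
  induction q with
  | zero => simp
  | succ q ih => rw [Nat.mul_succ, ← List.rotate_rotate, ih, hrot]

-- Euclidean descent: any nontrivial fixing rotation yields one through a proper divisor
theorem pv_euclid (s : List Char) : ∀ k, 0 < k → k < s.length → s.rotate k = s →
    ∃ d, 0 < d ∧ d < s.length ∧ d ∣ s.length ∧ s.rotate d = s := by
  intro k
  induction k using Nat.strong_induction_on with
  | _ k ih =>
    intro hk0 hkl hrot
    by_cases hdvd : k ∣ s.length
    · exact ⟨k, hk0, hkl, hdvd, hrot⟩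
    · have hr0 : 0 < s.length % k := Nat.pos_of_ne_zero (fun h => hdvd (Nat.dvd_of_mod_eq_zero h))
      have hrk : s.length % k < k := Nat.mod_lt _ hk0
      have hrrot : s.rotate (s.length % k) = s := by
        have h1 : s.rotate s.length = s := List.rotate_length s
        rw [show s.length = k * (s.length / k) + s.length % k from
              (Nat.div_add_mod s.length k).symm] at h1
        rw [← List.rotate_rotate, pv_rot_mul s k hrot] at h1
        exact h1
      exact ih _ hrk hr0 (by omega) hrrot

-- A's loop is the existence of a block count p ∣ l, 2 ≤ p ≤ l, whose block repeats to s
theorem pv_A_iff (n : Int) :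
    check n = true ↔ ∃ p : ℕ, 2 ≤ p ∧ p ≤ (PySem.Int.toChars n).length ∧
      (p : ℕ) ∣ (PySem.Int.toChars n).length ∧
      (List.replicate p ((PySem.Int.toChars n).take ((PySem.Int.toChars n).length / p))).flatten
        = PySem.Int.toChars n := by
  unfold check
  simp only [List.any_eq_true]
  constructor
  · rintro ⟨parts, hmem, hf⟩
    rw [PySem.List.mem_pyRange_iff_of_pos (by norm_num)] at hmem
    obtain ⟨h2, hlt, -⟩ := hmem
    set num := PySem.Int.toChars n with hnum
    obtain ⟨p, rfl⟩ : ∃ p : ℕ, parts = (p : Int) := ⟨parts.toNat, by omega⟩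
    have hp2 : 2 ≤ p := by omega
    have hpl : p ≤ num.length := by omega
    split at hf
    · rename_i hmod
      rw [beq_iff_eq, PySem.Int.mod_eq_zero_iff_dvd] at hmod
      have hdvd : p ∣ num.length := by exact_mod_cast hmod
      refine ⟨p, hp2, hpl, hdvd, ?_⟩
      rw [PySem.Int.floordiv_natCast num.length p] at hf
      rw [PySem.List.slice_to num (by positivity)] at hf
      rw [beq_iff_eq] at hf
      simpa [PySem.List.pyRepeat] using hf
    · simp at hf
  · rintro ⟨p, hp2, hpl, hdvd, heq⟩
    set num := PySem.Int.toChars n with hnum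
    refine ⟨(p : Int), ?_, ?_⟩
    · rw [PySem.List.mem_pyRange_iff_of_pos (by norm_num)]
      exact ⟨by exact_mod_cast hp2, by exact_mod_cast (by omega : (p:Int) < (num.length:Int) + 1),
        ⟨(p:Int) - 2, by ring⟩⟩
    · have hmod : PySem.Int.mod (num.length : Int) (p : Int) = 0 := by
        rw [PySem.Int.mod_eq_zero_iff_dvd]; exact_mod_cast hdvd
      rw [if_pos (by simp [hmod])]
      rw [PySem.Int.floordiv_natCast num.length p, PySem.List.slice_to num (by positivity)]
      rw [beq_iff_eq]
      simpa [PySem.List.pyRepeat] using heq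

theorem pv_main (n : Int) : check n = check_alt n := by
  have hs : PySem.Int.toChars n ≠ [] := pv_toChars_ne_nil n
  set s := PySem.Int.toChars n with hsdef
  have hl : 1 ≤ s.length := List.length_pos_iff.mpr hs
  rw [Bool.eq_iff_iff]
  show check n = true ↔ check_alt n = true
  rw [pv_A_iff n]
  unfold check_alt
  rw [← hsdef, pv_B_iff s hs]
  constructor
  · rintro ⟨p, hp2, hpl, hdvd, heq⟩
    have hlp : s.length / p * p = s.length := Nat.div_mul_cancel hdvd
    have hd1 : 1 ≤ s.length / p := by
      rcases Nat.eq_zero_or_pos (s.length / p) with h | h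
      · rw [h] at hlp; omega
      · exact h
    have htlen : (s.take (s.length / p)).length = s.length / p := by
      rw [List.length_take]
      have : s.length / p ≤ s.length := Nat.div_le_self _ _
      omega
    have hrot : s.rotate (s.length / p) = s := by
      have := pv_rot_of_rep p (s.take (s.length / p)) (by omega)
      rw [heq, htlen] at this
      exact this
    refine ⟨s.length / p, hd1, ?_, hrot⟩
    nlinarith
  · rintro ⟨k, hk1, hk2, hkrot⟩
    obtain ⟨d, hd0, hdl, hdvd, hrot⟩ := pv_euclid s k (by omega) hk2 hkrot
    have hld : d * (s.length / d) = s.length := Nat.mul_div_cancel' hdvd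
    set p := s.length / d with hpdef
    have hp2 : 2 ≤ p := by
      rcases Nat.lt_or_ge p 2 with h | h
      · interval_cases p <;> omega
      · exact h
    have hlp : s.length / p = d := by
      rw [hpdef, Nat.div_div_self hdvd (by omega)]
    refine ⟨p, hp2, ?_, ?_, ?_⟩
    · rw [hpdef]; exact Nat.div_le_self _ _
    · exact ⟨d, by rw [Nat.mul_comm] at hld; omega⟩
    · rw [hlp]
      exact (pv_rep_of_rot d p s (by omega) hrot).symm

-- ===== VERDICT (by name: the statement is the Claim_ definition above) =====
theorem check_spec : Claim_equal_check := by
  intro n _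
  unfold Spec_check
  exact pv_main n
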